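-- pv_equiv track=rewrite | github.com/Brandon-Michaels/LeetCodeQA | 2075-brightest-position-on-street/brightest-position-on-street.py | brightestPosition
-- ===== SOURCE A (Python) =====
-- from typing import List
--
-- def brightestPosition(lights: List[List[int]]) -> int:
--     # difference map, position => brightness
--     diff = {}
--
--     # traverse lights
--     # get L,R boundaries for each element
--     for pos, rng in lights:
--         L = pos - rng
--         R = pos + rng
--         diff[L] = diff.get(L, 0) + 1
--         diff[R + 1] = diff.get(R + 1, 0) - 1
--
--     # traverse diff, determine max illumination
--     # initialize variables to track brightness
--     max_brightness = float('-inf')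
--     min_position = 0
--
--     # current brightness at position
--     running = 0
--
--     # sort unique breakpoints
--     for x in sorted(diff.keys()):
--         # update brightness at x
--         running += diff[x]
--         if running > max_brightness:
--             max_brightness = running
--             # update min position to curr, processed in order
--             min_position = x
--
--     return min_position
-- ===== SOURCE B (Python) =====
-- def brightestPosition(lights):
--     # brute-force: for each candidate breakpoint, recompute brightness from scratch
--     # by a direct count over all lights (no difference map, no running prefix sum)
--     candidates = sorted({p - r for p, r in lights} | {p + r + 1 for p, r in lights})
--     best, pos = None, 0
--     for x in candidates:
--         b = sum((p - r <= x) - (p + r + 1 <= x) for p, r in lights)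
--         if best is None or b > best:
--             best, pos = b, x
--     return pos
-- ===== Notes on version B (the rewrite author's own statement) =====
-- stated objective: simpler
-- what changed: Replaces A's difference map and incremental running prefix sum over sorted keys by a stateless brute force: for each distinct breakpoint, brightness is recomputed from scratch by one direct count over all lights, then the leftmost maximum is taken.
import Mathlib
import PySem

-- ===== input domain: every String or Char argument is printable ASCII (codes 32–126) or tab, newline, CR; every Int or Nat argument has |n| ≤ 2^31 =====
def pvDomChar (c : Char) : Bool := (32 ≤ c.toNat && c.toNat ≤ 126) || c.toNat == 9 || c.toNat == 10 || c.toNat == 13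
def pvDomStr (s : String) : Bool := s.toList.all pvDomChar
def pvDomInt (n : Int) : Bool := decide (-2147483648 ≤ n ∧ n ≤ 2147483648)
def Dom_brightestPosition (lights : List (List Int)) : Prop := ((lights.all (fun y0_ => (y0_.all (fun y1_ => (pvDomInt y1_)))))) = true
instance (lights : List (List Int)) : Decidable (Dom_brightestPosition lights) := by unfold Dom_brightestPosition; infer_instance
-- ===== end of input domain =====

-- B drops A's difference map and running prefix sum: it recomputes the brightness at each
-- distinct breakpoint from scratch by one direct count over all lights (stateless brute force).

-- ===== PORT A =====
-- float('-inf') for max_brightness is modeled as `none : Option Int` (the comparison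
-- `running > -inf` is always true = the `none` branch); `diff[x]` in the sweep is ported
-- as `getD x 0`, exact there because x is always a key of diff.
-- Row unpacking `for pos, rng in lights` is exact under Pre_ (rows of length 2).
def brightestPosition (lights : List (List Int)) : Int :=
  let diff := lights.foldl (fun d l =>
      let pos := PySem.List.pyGetD l 0 0
      let rng := PySem.List.pyGetD l 1 0
      let d := d.insert (pos - rng) (d.getD (pos - rng) 0 + 1)
      d.insert (pos + rng + 1) (d.getD (pos + rng + 1) 0 - 1))
    PySem.Dict.empty
  let fin := (PySem.List.sorted (PySem.Dict.keys diff) (fun x => x) false).foldl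
    (fun (st : Option Int × Int × Int) x =>
      let running := st.2.2 + diff.getD x 0
      if st.1.elim true (fun m => decide (m < running)) then (some running, x, running)
      else (st.1, st.2.1, running))
    (none, 0, 0)
  fin.2.1

-- ===== PORT B =====
-- the python booleans (p-r <= x), (p+r+1 <= x) summed in the generator become if-then-else 1/0
def brightestPosition_alt (lights : List (List Int)) : Int :=
  let candidates := PySem.List.sorted
    (PySem.Set.union
      (PySem.Set.ofList (lights.map (fun l => PySem.List.pyGetD l 0 0 - PySem.List.pyGetD l 1 0)))
      (PySem.Set.ofList (lights.map (fun l => PySem.List.pyGetD l 0 0 + PySem.List.pyGetD l 1 0 + 1))))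
    (fun x => x) false
  let fin := candidates.foldl
    (fun (st : Option Int × Int) x =>
      let b : Int := lights.foldl (fun s l =>
        s + ((if PySem.List.pyGetD l 0 0 - PySem.List.pyGetD l 1 0 ≤ x then (1 : Int) else 0)
           - (if PySem.List.pyGetD l 0 0 + PySem.List.pyGetD l 1 0 + 1 ≤ x then (1 : Int) else 0))) 0
      if st.1.elim true (fun m => decide (m < b)) then (some b, x)
      else st)
    (none, 0)
  fin.2

-- ===== PRECONDITION & SPEC =====
-- Pre_ excludes rows not of length 2, on which A's `for pos, rng in lights` raises ValueError.
def Pre_brightestPosition (lights : List (List Int)) : Prop := ∀ l ∈ lights, l.length = 2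
instance (lights : List (List Int)) : Decidable (Pre_brightestPosition lights) := by
  unfold Pre_brightestPosition; infer_instance
def pvWitness_brightestPosition : List (List Int) := [[0, 2], [3, 1], [5, -4]]

def Spec_brightestPosition (lights : List (List Int)) (out : Int) : Prop := out = brightestPosition_alt lights
instance (lights : List (List Int)) (out : Int) : Decidable (Spec_brightestPosition lights out) := by unfold Spec_brightestPosition; infer_instance

-- ===== CLAIM (what is proved, stated in full; the proofs are below) =====
def Claim_equal_brightestPosition : Prop := ∀ (lights : List (List Int)), Dom_brightestPosition lights → Pre_brightestPosition lights → Spec_brightestPosition lights (brightestPosition lights)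

-- ===== LEMMAS AND PROOFS =====

-- the per-light start/end coordinates, as the ports compute them
def pvS (lights : List (List Int)) : List Int :=
  lights.map (fun l => PySem.List.pyGetD l 0 0 - PySem.List.pyGetD l 1 0)
def pvE (lights : List (List Int)) : List Int :=
  lights.map (fun l => PySem.List.pyGetD l 0 0 + PySem.List.pyGetD l 1 0 + 1)

-- the dict and the traversal orders, named for the proofs
def pvDict (lights : List (List Int)) : PySem.Dict Int Int :=
  lights.foldl (fun d l =>
    let pos := PySem.List.pyGetD l 0 0
    let rng := PySem.List.pyGetD l 1 0
    let d := d.insert (pos - rng) (d.getD (pos - rng) 0 + 1)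
    d.insert (pos + rng + 1) (d.getD (pos + rng + 1) 0 - 1)) PySem.Dict.empty
def pvCoordsA (lights : List (List Int)) : List Int :=
  PySem.List.sorted (pvDict lights).keys (fun x => x) false
def pvCoordsB (lights : List (List Int)) : List Int :=
  PySem.List.sorted
    (PySem.Set.union (PySem.Set.ofList (pvS lights)) (PySem.Set.ofList (pvE lights)))
    (fun x => x) false

-- A's dict holds, at every coordinate, (#starts there) − (#ends there)
lemma pv_diff_getD (lights : List (List Int)) (d : PySem.Dict Int Int) (x : Int) :
    (lights.foldl (fun d l =>
      let pos := PySem.List.pyGetD l 0 0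
      let rng := PySem.List.pyGetD l 1 0
      let d := d.insert (pos - rng) (d.getD (pos - rng) 0 + 1)
      d.insert (pos + rng + 1) (d.getD (pos + rng + 1) 0 - 1)) d).getD x 0
    = d.getD x 0 + ((pvS lights).count x : Int) - ((pvE lights).count x : Int) := by
  induction lights generalizing d with
  | nil => simp [pvS, pvE]
  | cons l t ih =>
    simp only [List.foldl_cons]
    rw [ih]
    set p := PySem.List.pyGetD l 0 0 with hp
    set r := PySem.List.pyGetD l 1 0 with hr
    have hne : (p + r + 1) ≠ (p - r) := by omega
    have hstep : ((d.insert (p - r) (d.getD (p - r) 0 + 1)).insert (p + r + 1)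
        ((d.insert (p - r) (d.getD (p - r) 0 + 1)).getD (p + r + 1) 0 - 1)).getD x 0
        = d.getD x 0 + (if x = p - r then 1 else 0) - (if x = p + r + 1 then 1 else 0) := by
      by_cases hx : x = p + r + 1
      · subst hx
        rw [PySem.Dict.getD_insert_self, PySem.Dict.getD_insert_of_ne _ _ _ hne]
        simp [hne]
      · rw [PySem.Dict.getD_insert_of_ne _ _ _ hx]
        by_cases hxL : x = p - r
        · subst hxL
          rw [PySem.Dict.getD_insert_self]
          simp [hx]
        · rw [PySem.Dict.getD_insert_of_ne _ _ _ hxL]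
          simp [hx, hxL]
    rw [hstep]
    simp only [pvS, pvE, List.map_cons, List.count_cons]
    push_cast
    split_ifs <;> simp_all <;> omega

-- A's dict-building loop is a fold over the flattened (coordinate, ±1) event pairs
def pvPairs (lights : List (List Int)) : List (Int × Int) :=
  lights.flatMap (fun l =>
    [(PySem.List.pyGetD l 0 0 - PySem.List.pyGetD l 1 0, (1 : Int)),
     (PySem.List.pyGetD l 0 0 + PySem.List.pyGetD l 1 0 + 1, (-1 : Int))])

lemma pv_fold_eq (lights : List (List Int)) (d : PySem.Dict Int Int) :
    lights.foldl (fun d l =>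
      let pos := PySem.List.pyGetD l 0 0
      let rng := PySem.List.pyGetD l 1 0
      let d := d.insert (pos - rng) (d.getD (pos - rng) 0 + 1)
      d.insert (pos + rng + 1) (d.getD (pos + rng + 1) 0 - 1)) d
    = (pvPairs lights).foldl (fun d p => d.insert p.1 (d.getD p.1 0 + p.2)) d := by
  induction lights generalizing d with
  | nil => rfl
  | cons l t ih =>
    simp only [pvPairs, List.flatMap_cons, List.foldl_append, List.foldl_cons]
    rw [ih]
    simp only [pvPairs]
    congr 2

lemma pv_keys_eq (lights : List (List Int)) :
    (pvDict lights).keys = PySem.Set.ofList ((pvPairs lights).map Prod.fst) := by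
  rw [pvDict, pv_fold_eq, PySem.Dict.keys_foldl_insert_key]
  have h : (PySem.Dict.empty : PySem.Dict Int Int).keys = [] := rfl
  rw [h, PySem.Set.update_nil_left]

lemma pv_mem_pairs_fst (lights : List (List Int)) (x : Int) :
    x ∈ (pvPairs lights).map Prod.fst ↔ x ∈ pvS lights ∨ x ∈ pvE lights := by
  simp only [pvPairs, pvS, pvE, List.mem_map, List.mem_flatMap, List.mem_cons,
    List.not_mem_nil, or_false]
  constructor
  · rintro ⟨p, ⟨l, hl, hp | hp⟩, hx⟩
    · exact Or.inl ⟨l, hl, by subst hp; exact hx⟩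
    · exact Or.inr ⟨l, hl, by subst hp; exact hx⟩
  · rintro (⟨l, hl, hx⟩ | ⟨l, hl, hx⟩)
    · exact ⟨_, ⟨l, hl, Or.inl rfl⟩, hx⟩
    · exact ⟨_, ⟨l, hl, Or.inr rfl⟩, hx⟩

-- counting split: #(≤ x) = #(< x) + #(= x)
lemma pv_countP_le_split (l : List Int) (x : Int) :
    l.countP (fun y => decide (y ≤ x)) = l.countP (fun y => decide (y < x)) + l.count x := by
  induction l with
  | nil => simp
  | cons a t ih =>
    by_cases h : a = x
    · subst h; simp [ih]; omega
    · rcases lt_or_gt_of_ne h with h1 | h1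
      · simp [ih, h, le_of_lt h1, h1]; omega
      · have h2 : ¬ a < x := by omega
        have h3 : ¬ a ≤ x := by omega
        simp [ih, h, h2, h3]

-- B's per-candidate generator sum counts #(starts ≤ x) − #(ends ≤ x)
lemma pv_bright (lights : List (List Int)) (x : Int) (s : Int) :
    lights.foldl (fun s l =>
        s + ((if PySem.List.pyGetD l 0 0 - PySem.List.pyGetD l 1 0 ≤ x then (1 : Int) else 0)
           - (if PySem.List.pyGetD l 0 0 + PySem.List.pyGetD l 1 0 + 1 ≤ x then (1 : Int) else 0))) s
    = s + ((pvS lights).countP (fun y => decide (y ≤ x)) : Int)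
        - ((pvE lights).countP (fun y => decide (y ≤ x)) : Int) := by
  induction lights generalizing s with
  | nil => simp [pvS, pvE]
  | cons l t ih =>
    simp only [List.foldl_cons]
    rw [ih]
    simp only [pvS, pvE, List.map_cons, List.countP_cons]
    split_ifs <;> simp_all <;> omega

-- A's incremental sweep and B's stateless recomputation agree on any strictly
-- increasing coordinate list covering all events
lemma pv_sweep (S E : List Int) (δ : Int → Int)
    (hδ : ∀ x, δ x = (S.count x : Int) - (E.count x : Int)) :
    ∀ (rest : List Int), rest.Pairwise (· < ·) →
    (∀ y, (y ∈ S ∨ y ∈ E) → y ∉ rest → ∀ x ∈ rest, y < x) →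
    ∀ (best : Option Int) (pos running : Int),
    (∀ x, rest.head? = some x →
        running = (S.countP (fun y => decide (y < x)) : Int) - (E.countP (fun y => decide (y < x)) : Int)) →
    (rest.foldl (fun (st : Option Int × Int × Int) x =>
        let running := st.2.2 + δ x
        if st.1.elim true (fun m => decide (m < running)) then (some running, x, running)
        else (st.1, st.2.1, running)) (best, pos, running)).2.1
    = (rest.foldl (fun (st : Option Int × Int) x =>
        let b : Int := (S.countP (fun y => decide (y ≤ x)) : Int) - (E.countP (fun y => decide (y ≤ x)) : Int)
        if st.1.elim true (fun m => decide (m < b)) then (some b, x)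
        else st) (best, pos)).2 := by
  intro rest
  induction rest with
  | nil =>
    intro _ _ best pos running _
    rfl
  | cons x rest' ihr =>
    intro hpw hcov best pos running hhead
    have hrun := hhead x rfl
    rw [List.pairwise_cons] at hpw
    have hb : ((S.countP (fun y => decide (y ≤ x)) : Int))
        - ((E.countP (fun y => decide (y ≤ x)) : Int)) = running + δ x := by
      rw [hδ, hrun, pv_countP_le_split, pv_countP_le_split]
      push_cast
      ring
    have hA : ((x :: rest').foldl (fun (st : Option Int × Int × Int) x =>
        let running := st.2.2 + δ x
        if st.1.elim true (fun m => decide (m < running)) then (some running, x, running)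
        else (st.1, st.2.1, running)) (best, pos, running))
      = (rest'.foldl (fun (st : Option Int × Int × Int) x =>
        let running := st.2.2 + δ x
        if st.1.elim true (fun m => decide (m < running)) then (some running, x, running)
        else (st.1, st.2.1, running))
        (if best.elim true (fun m => decide (m < (running + δ x))) then (some (running + δ x), x, running + δ x)
         else (best, pos, running + δ x))) := rfl
    have hB : ((x :: rest').foldl (fun (st : Option Int × Int) x =>
        let b : Int := (S.countP (fun y => decide (y ≤ x)) : Int) - (E.countP (fun y => decide (y ≤ x)) : Int)
        if st.1.elim true (fun m => decide (m < b)) then (some b, x)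
        else st) (best, pos))
      = (rest'.foldl (fun (st : Option Int × Int) x =>
        let b : Int := (S.countP (fun y => decide (y ≤ x)) : Int) - (E.countP (fun y => decide (y ≤ x)) : Int)
        if st.1.elim true (fun m => decide (m < b)) then (some b, x)
        else st)
        (if best.elim true (fun m => decide (m < ((S.countP (fun y => decide (y ≤ x)) : Int) - (E.countP (fun y => decide (y ≤ x)) : Int))))
         then (some ((S.countP (fun y => decide (y ≤ x)) : Int) - (E.countP (fun y => decide (y ≤ x)) : Int)), x)
         else (best, pos))) := rfl
    rw [hA, hB, hb]
    -- counting "≤ x" and "< next coordinate" agree on covered lists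
    have hnext : ∀ (M : List Int), (∀ y ∈ M, y ∈ S ∨ y ∈ E) → ∀ x', rest'.head? = some x' →
        M.countP (fun y => decide (y ≤ x)) = M.countP (fun y => decide (y < x')) := by
      intro M hM x' hx'
      have hx'mem : x' ∈ rest' := List.mem_of_mem_head? hx'
      have hxx' : x < x' := hpw.1 x' hx'mem
      apply List.countP_congr
      intro y hy
      simp only [decide_eq_true_eq]
      constructor
      · intro h; omega
      · intro h
        by_cases hyr : y ∈ x :: rest'
        · rcases List.mem_cons.mp hyr with h1 | h1
          · omega
          · exfalso
            obtain ⟨tt, htt⟩ : ∃ tt, rest' = x' :: tt := by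
              cases rest' with
              | nil => simp at hx'
              | cons a tt =>
                have : a = x' := by simpa using hx'
                exact ⟨tt, by rw [this]⟩
            subst htt
            rcases List.mem_cons.mp h1 with h2 | h2
            · omega
            · have := (List.pairwise_cons.mp hpw.2).1 y h2
              omega
        · have := hcov y (hM y hy) hyr x (List.mem_cons_self)
          omega
    have hhead' : ∀ x', rest'.head? = some x' →
        running + δ x = ((S.countP (fun y => decide (y < x')) : Int))
            - ((E.countP (fun y => decide (y < x')) : Int)) := by
      intro x' hx'
      rw [← hb, hnext S (fun y hy => Or.inl hy) x' hx', hnext E (fun y hy => Or.inr hy) x' hx']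
    have hcov' : ∀ y, (y ∈ S ∨ y ∈ E) → y ∉ rest' → ∀ z ∈ rest', y < z := by
      intro y hy hyn z hz
      by_cases hyr : y ∈ x :: rest'
      · rcases List.mem_cons.mp hyr with h1 | h1
        · exact h1 ▸ hpw.1 z hz
        · exact absurd h1 hyn
      · exact hcov y hy hyr z (List.mem_cons_of_mem x hz)
    by_cases hcnd : best.elim true (fun m => decide (m < (running + δ x))) = true
    · simp only [hcnd, if_true]
      exact ihr hpw.2 hcov' _ _ _ hhead'
    · simp only [hcnd, if_false, Bool.false_eq_true]
      exact ihr hpw.2 hcov' _ _ _ hhead'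

-- ===== VERDICT (by name: the statement is the Claim_ definition above) =====
theorem brightestPosition_spec : Claim_equal_brightestPosition := by
  intro lights _ _
  show brightestPosition lights = brightestPosition_alt lights
  have h1 : brightestPosition lights
      = ((pvCoordsA lights).foldl (fun (st : Option Int × Int × Int) x =>
          let running := st.2.2 + (pvDict lights).getD x 0
          if st.1.elim true (fun m => decide (m < running)) then (some running, x, running)
          else (st.1, st.2.1, running)) (none, 0, 0)).2.1 := rfl
  have h2 : brightestPosition_alt lights
      = ((pvCoordsB lights).foldl (fun (st : Option Int × Int) x =>
          let b : Int := lights.foldl (fun s l =>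
            s + ((if PySem.List.pyGetD l 0 0 - PySem.List.pyGetD l 1 0 ≤ x then (1 : Int) else 0)
               - (if PySem.List.pyGetD l 0 0 + PySem.List.pyGetD l 1 0 + 1 ≤ x then (1 : Int) else 0))) 0
          if st.1.elim true (fun m => decide (m < b)) then (some b, x)
          else st) (none, 0)).2 := rfl
  -- B's step function, with the inner count rewritten to the countP difference
  have hstep : (fun (st : Option Int × Int) (x : Int) =>
          let b : Int := lights.foldl (fun s l =>
            s + ((if PySem.List.pyGetD l 0 0 - PySem.List.pyGetD l 1 0 ≤ x then (1 : Int) else 0)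
               - (if PySem.List.pyGetD l 0 0 + PySem.List.pyGetD l 1 0 + 1 ≤ x then (1 : Int) else 0))) 0
          if st.1.elim true (fun m => decide (m < b)) then (some b, x)
          else st)
      = (fun (st : Option Int × Int) (x : Int) =>
          let b : Int := ((pvS lights).countP (fun y => decide (y ≤ x)) : Int)
              - ((pvE lights).countP (fun y => decide (y ≤ x)) : Int)
          if st.1.elim true (fun m => decide (m < b)) then (some b, x)
          else st) := by
    funext st x
    simp only [pv_bright lights x 0, zero_add]
  -- keys of the dict = the event coordinates
  have hkeysmem : ∀ x : Int, x ∈ (pvDict lights).keys ↔ x ∈ pvS lights ∨ x ∈ pvE lights := by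
    intro x
    rw [pv_keys_eq, PySem.Set.mem_ofList]
    exact pv_mem_pairs_fst lights x
  have hkeysnd : (pvDict lights).keys.Nodup := by
    rw [pv_keys_eq]; exact PySem.Set.nodup_ofList _
  -- the two coordinate lists coincide
  have hcoords : pvCoordsB lights = pvCoordsA lights := by
    apply PySem.List.sorted_eq_sorted_of_perm _ _ _ (fun a b h => h)
    apply List.perm_of_nodup_nodup_toFinset_eq
      (PySem.Set.nodup_union _ _ (PySem.Set.nodup_ofList _)) hkeysnd
    ext a
    simp only [List.mem_toFinset, PySem.Set.mem_union, PySem.Set.mem_ofList, hkeysmem]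
  -- the common list is strictly increasing
  have hpl : (pvCoordsA lights).Pairwise (· < ·) := by
    have ha : (pvCoordsA lights).Pairwise (· ≤ ·) :=
      PySem.List.sorted_pairwise (pvDict lights).keys (fun x => x)
    have hnd : (pvCoordsA lights).Nodup :=
      (PySem.List.sorted_perm (pvDict lights).keys (fun x => x) false).nodup_iff.mpr hkeysnd
    exact (ha.and hnd).imp (fun h => lt_of_le_of_ne h.1 h.2)
  -- every event coordinate occurs in it
  have hcov : ∀ y, (y ∈ pvS lights ∨ y ∈ pvE lights) → y ∉ pvCoordsA lights →
      ∀ x ∈ pvCoordsA lights, y < x := by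
    intro y hy hyn
    exact False.elim (hyn ((PySem.List.mem_sorted _ _ _ _).mpr ((hkeysmem y).mpr hy)))
  -- the initial running value satisfies the sweep invariant
  have hhead : ∀ x, (pvCoordsA lights).head? = some x →
      (0 : Int) = (((pvS lights).countP (fun y => decide (y < x)) : Int))
          - (((pvE lights).countP (fun y => decide (y < x)) : Int)) := by
    intro x hx
    obtain ⟨t, ht⟩ : ∃ t, pvCoordsA lights = x :: t := by
      cases h : pvCoordsA lights with
      | nil => rw [h] at hx; simp at hx
      | cons a t =>
        rw [h] at hx
        have ha : a = x := by simpa using hx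
        exact ⟨t, by rw [ha]⟩
    have hmin : ∀ y ∈ (pvDict lights).keys, x ≤ y :=
      PySem.List.key_head_sorted_le (pvDict lights).keys (fun x => x) ht
    have hz : ∀ (M : List Int), (∀ y ∈ M, y ∈ pvS lights ∨ y ∈ pvE lights) →
        M.countP (fun y => decide (y < x)) = 0 := by
      intro M hM
      apply List.countP_eq_zero.mpr
      intro y hy
      simp only [decide_eq_true_eq]
      have := hmin y ((hkeysmem y).mpr (hM y hy))
      omega
    rw [hz (pvS lights) (fun y hy => Or.inl hy), hz (pvE lights) (fun y hy => Or.inr hy)]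
    simp
  -- the dict's values are the per-coordinate deltas
  have hδ : ∀ x : Int, (pvDict lights).getD x 0
      = (((pvS lights).count x : Int)) - (((pvE lights).count x : Int)) := by
    intro x
    have h0 : (PySem.Dict.empty : PySem.Dict Int Int).getD x 0 = 0 := rfl
    have := pv_diff_getD lights PySem.Dict.empty x
    rw [h0] at this
    rw [pvDict, this]
    ring
  rw [h1, h2, hstep, hcoords]
  exact pv_sweep (pvS lights) (pvE lights)
    (fun x => (pvDict lights).getD x 0) hδ
    (pvCoordsA lights) hpl hcov none 0 0 hhead
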